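-- pv_equiv track=rewrite | github.com/kyw613/CodingTest | 프로그래머스/2/49994. 방문 길이/방문 길이.py | solution
-- ===== SOURCE A (Python) =====
-- def solution(dirs):
--     # 처음걸어본 길의 길이 만약 나가는 경우에는 그냥 명령 무시한다.
--     pos_dict = {"U":(1,0),"D":(-1,0),"R":(0,1),"L":(0,-1)}
--     #L,R,U,D별로 넣는거야 그래서 만약에 있으면 이동은 하지만 total은 안오르는걸로
--     total = 0
--     U = {}
--     D = {}
--     R = {}
--     L = {}
--     now_y,now_x = 0,0
--     for i in dirs:
--         dy,dx = pos_dict[i]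
--         if i == "U":
--             ny = now_y + dy
--             nx = now_x + dx
--             if -5 <= ny <=5 and -5 <= nx <= 5:
--                 if (now_y,now_x) not in U and (now_y+1,now_x) not in D:
--                     U[(now_y,now_x)] = 1
--                     D[(now_y+1,now_x)] = 1
--                     total += 1
--                 now_y, now_x = ny,nx
--         if i == "D":
--             ny = now_y + dy
--             nx = now_x + dx
--             if -5 <= ny <=5 and -5 <= nx <= 5:
--                 if (now_y,now_x) not in D and (now_y-1,now_x) not in U:
--                     D[(now_y,now_x)] = 1
--                     U[(now_y-1,now_x)] = 1
--                     total += 1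
--                 now_y, now_x = ny,nx
--         if i == "R":
--             ny = now_y + dy
--             nx = now_x + dx
--             if -5 <= ny <=5 and -5 <= nx <= 5:
--                 if (now_y,now_x) not in R and (now_y,now_x+1) not in L:
--                     R[(now_y,now_x)] = 1
--                     L[(now_y,now_x+1)] = 1
--                     total += 1
--                 now_y, now_x = ny,nx
--         if i == "L":
--             ny = now_y + dy
--             nx = now_x + dx
--             if -5 <= ny <=5 and -5 <= nx <= 5:
--                 if (now_y,now_x) not in L and (now_y,now_x-1) not in R:
--                     L[(now_y,now_x)] = 1
--                     R[(now_y,now_x-1)] = 1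
--                     total += 1
--                 now_y, now_x = ny,nx
--     return total
-- ===== SOURCE B (Python) =====
-- def solution(dirs):
--     # Offline sort-and-scan: record every in-bounds step's canonical edge (duplicates
--     # included), then sort the edge list and count runs of equal edges.
--     delta = {"U": (1, 0), "D": (-1, 0), "R": (0, 1), "L": (0, -1)}
--     y = x = 0
--     edges = []
--     for c in dirs:
--         dy, dx = delta[c]
--         ny, nx = y + dy, x + dx
--         if -5 <= ny <= 5 and -5 <= nx <= 5:
--             edges.append(((y, x), (ny, nx)) if (y, x) <= (ny, nx) else ((ny, nx), (y, x)))
--             y, x = ny, nx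
--     edges.sort()
--     count = 0
--     prev = None
--     for e in edges:
--         if e != prev:
--             count += 1
--             prev = e
--     return count
-- ===== Notes on version B (the rewrite author's own statement) =====
-- stated objective: alternative
-- what changed: A deduplicates online with four directional hash dicts and a running counter; B instead records the multiset of canonical edges walked (duplicates and all), then sorts the list and counts runs of equal edges in one scan - offline sort-and-scan dedup with no set/dict at all.
import Mathlib
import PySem

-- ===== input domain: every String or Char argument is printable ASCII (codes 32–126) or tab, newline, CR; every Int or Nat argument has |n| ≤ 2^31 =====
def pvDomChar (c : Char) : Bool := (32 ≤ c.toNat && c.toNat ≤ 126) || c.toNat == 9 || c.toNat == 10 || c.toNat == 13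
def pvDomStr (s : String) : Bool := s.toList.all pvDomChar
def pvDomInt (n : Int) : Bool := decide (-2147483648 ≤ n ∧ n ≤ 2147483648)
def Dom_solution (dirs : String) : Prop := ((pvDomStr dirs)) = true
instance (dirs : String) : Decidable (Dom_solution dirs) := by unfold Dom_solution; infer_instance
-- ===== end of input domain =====

-- B replaces A's online dedup (four directional dicts + running counter) by an offline
-- sort-and-scan: record every in-bounds step's canonical edge (with duplicates), sort the
-- list, count runs of equal edges; objective: alternative.

-- ===== PORT A =====
-- A's loop state: total, the four dicts U D R L, and the position (now_y, now_x).
structure StA where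
  total : Int
  u : PySem.Dict (Int × Int) Int
  d : PySem.Dict (Int × Int) Int
  r : PySem.Dict (Int × Int) Int
  l : PySem.Dict (Int × Int) Int
  y : Int
  x : Int
  deriving Repr, DecidableEq

def posDictA : PySem.Dict Char (Int × Int) :=
  PySem.Dict.ofList [('U', (1, 0)), ('D', (-1, 0)), ('R', (0, 1)), ('L', (0, -1))]

-- one loop iteration of A: pos_dict[i], then the four sequential `if` statements
def stepA (s : StA) (i : Char) : StA :=
  match posDictA.get? i with
  | none => s   -- Python raises KeyError here; excluded by Pre_solution
  | some (dy, dx) =>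
    let s :=
      if i = 'U' then
        let ny := s.y + dy
        let nx := s.x + dx
        if -5 ≤ ny ∧ ny ≤ 5 ∧ -5 ≤ nx ∧ nx ≤ 5 then
          if ¬ s.u.contains (s.y, s.x) ∧ ¬ s.d.contains (s.y + 1, s.x) then
            { s with u := s.u.insert (s.y, s.x) 1, d := s.d.insert (s.y + 1, s.x) 1,
                     total := s.total + 1, y := ny, x := nx }
          else { s with y := ny, x := nx }
        else s
      else s
    let s :=
      if i = 'D' then
        let ny := s.y + dy
        let nx := s.x + dx
        if -5 ≤ ny ∧ ny ≤ 5 ∧ -5 ≤ nx ∧ nx ≤ 5 then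
          if ¬ s.d.contains (s.y, s.x) ∧ ¬ s.u.contains (s.y - 1, s.x) then
            { s with d := s.d.insert (s.y, s.x) 1, u := s.u.insert (s.y - 1, s.x) 1,
                     total := s.total + 1, y := ny, x := nx }
          else { s with y := ny, x := nx }
        else s
      else s
    let s :=
      if i = 'R' then
        let ny := s.y + dy
        let nx := s.x + dx
        if -5 ≤ ny ∧ ny ≤ 5 ∧ -5 ≤ nx ∧ nx ≤ 5 then
          if ¬ s.r.contains (s.y, s.x) ∧ ¬ s.l.contains (s.y, s.x + 1) then
            { s with r := s.r.insert (s.y, s.x) 1, l := s.l.insert (s.y, s.x + 1) 1,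
                     total := s.total + 1, y := ny, x := nx }
          else { s with y := ny, x := nx }
        else s
      else s
    let s :=
      if i = 'L' then
        let ny := s.y + dy
        let nx := s.x + dx
        if -5 ≤ ny ∧ ny ≤ 5 ∧ -5 ≤ nx ∧ nx ≤ 5 then
          if ¬ s.l.contains (s.y, s.x) ∧ ¬ s.r.contains (s.y, s.x - 1) then
            { s with l := s.l.insert (s.y, s.x) 1, r := s.r.insert (s.y, s.x - 1) 1,
                     total := s.total + 1, y := ny, x := nx }
          else { s with y := ny, x := nx }
        else s
      else s
    s

def solution (dirs : String) : Int :=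
  (dirs.toList.foldl stepA
    ⟨0, PySem.Dict.empty, PySem.Dict.empty, PySem.Dict.empty, PySem.Dict.empty, 0, 0⟩).total

-- ===== PORT B =====
-- B's first phase state: the list of canonical edges walked (duplicates kept) and the position.
structure StB where
  edges : List ((Int × Int) × (Int × Int))
  y : Int
  x : Int
  deriving Repr, DecidableEq

def posDictB : PySem.Dict Char (Int × Int) :=
  PySem.Dict.ofList [('U', (1, 0)), ('D', (-1, 0)), ('R', (0, 1)), ('L', (0, -1))]

-- Python's tuple comparison a <= b on int pairs (lexicographic), as Source B uses it
def pairLe (a b : Int × Int) : Bool :=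
  decide (a.1 < b.1 ∨ (a.1 = b.1 ∧ a.2 ≤ b.2))

def stepB (s : StB) (c : Char) : StB :=
  match posDictB.get? c with
  | none => s   -- Python raises KeyError here; excluded by Pre_solution
  | some (dy, dx) =>
    let ny := s.y + dy
    let nx := s.x + dx
    if -5 ≤ ny ∧ ny ≤ 5 ∧ -5 ≤ nx ∧ nx ≤ 5 then
      let a := (s.y, s.x)
      let b := (ny, nx)
      { edges := s.edges ++ [if pairLe a b then (a, b) else (b, a)], y := ny, x := nx }
    else s

-- edges.sort(): Python orders these 4-int tuples lexicographically; every recorded edge has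
-- all coordinates in [-5,5], and on those edgeKey packs the four coordinates into one Int
-- realizing exactly that lexicographic order, injectively — the sorted list is identical.
def edgeKey (e : (Int × Int) × (Int × Int)) : Int :=
  ((e.1.1 * 16 + e.1.2) * 16 + e.2.1) * 16 + e.2.2

def solution_alt (dirs : String) : Int :=
  let st := dirs.toList.foldl stepB ⟨[], 0, 0⟩
  let sortedE := PySem.List.sorted st.edges edgeKey false
  -- count = 0; prev = None; for e in sortedE: if e != prev: count += 1; prev = e
  (sortedE.foldl (fun s e => if some e = s.2 then s else (s.1 + 1, some e))
    ((0 : Int), (none : Option ((Int × Int) × (Int × Int))))).1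

-- ===== PRECONDITION & SPEC =====
-- Pre_ excludes exactly the strings containing a character other than the four valid moves, on which A raises KeyError.
def Pre_solution (dirs : String) : Prop :=
  (dirs.toList.all (fun c => c == 'U' || c == 'D' || c == 'R' || c == 'L')) = true
instance (dirs : String) : Decidable (Pre_solution dirs) := by unfold Pre_solution; infer_instance

def pvWitness_solution : String := "UL"

def Spec_solution (dirs : String) (out : Int) : Prop := out = solution_alt dirs
instance (dirs : String) (out : Int) : Decidable (Spec_solution dirs out) := by unfold Spec_solution; infer_instance

-- ===== CLAIM (what is proved, stated in full; the proofs are below) =====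
def Claim_equal_solution : Prop := ∀ (dirs : String), Dom_solution dirs → Pre_solution dirs → Spec_solution dirs (solution dirs)

-- ===== LEMMAS AND PROOFS =====

-- all four coordinates of an edge lie in [-5,5]
def EdgeInB (e : (Int × Int) × (Int × Int)) : Prop :=
  -5 ≤ e.1.1 ∧ e.1.1 ≤ 5 ∧ -5 ≤ e.1.2 ∧ e.1.2 ≤ 5 ∧
  -5 ≤ e.2.1 ∧ e.2.1 ≤ 5 ∧ -5 ≤ e.2.2 ∧ e.2.2 ≤ 5

-- the invariant coupling A's loop state with B's first-phase state
def EdgeInv (sa : StA) (sb : StB) : Prop :=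
  sa.y = sb.y ∧ sa.x = sb.x ∧
  (-5 ≤ sb.y ∧ sb.y ≤ 5 ∧ -5 ≤ sb.x ∧ sb.x ≤ 5) ∧
  (∀ e ∈ sb.edges, EdgeInB e) ∧
  sa.total = PySem.Set.len (PySem.Set.ofList sb.edges) ∧
  (∀ p : Int × Int, p ∈ sa.u.keys ↔ (p, (p.1 + 1, p.2)) ∈ sb.edges) ∧
  (∀ p : Int × Int, p ∈ sa.d.keys ↔ ((p.1 - 1, p.2), p) ∈ sb.edges) ∧
  (∀ p : Int × Int, p ∈ sa.r.keys ↔ (p, (p.1, p.2 + 1)) ∈ sb.edges) ∧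
  (∀ p : Int × Int, p ∈ sa.l.keys ↔ ((p.1, p.2 - 1), p) ∈ sb.edges)

-- reduced forms of the two step functions on each admitted character (definitional)
theorem stepA_U (s : StA) : stepA s 'U' =
    (if -5 ≤ s.y + 1 ∧ s.y + 1 ≤ 5 ∧ -5 ≤ s.x + 0 ∧ s.x + 0 ≤ 5 then
      if ¬ s.u.contains (s.y, s.x) ∧ ¬ s.d.contains (s.y + 1, s.x) then
        { s with u := s.u.insert (s.y, s.x) 1, d := s.d.insert (s.y + 1, s.x) 1,
                 total := s.total + 1, y := s.y + 1, x := s.x + 0 }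
      else { s with y := s.y + 1, x := s.x + 0 }
    else s) := rfl

theorem stepA_D (s : StA) : stepA s 'D' =
    (if -5 ≤ s.y + -1 ∧ s.y + -1 ≤ 5 ∧ -5 ≤ s.x + 0 ∧ s.x + 0 ≤ 5 then
      if ¬ s.d.contains (s.y, s.x) ∧ ¬ s.u.contains (s.y - 1, s.x) then
        { s with d := s.d.insert (s.y, s.x) 1, u := s.u.insert (s.y - 1, s.x) 1,
                 total := s.total + 1, y := s.y + -1, x := s.x + 0 }
      else { s with y := s.y + -1, x := s.x + 0 }
    else s) := rfl

theorem stepA_R (s : StA) : stepA s 'R' =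
    (if -5 ≤ s.y + 0 ∧ s.y + 0 ≤ 5 ∧ -5 ≤ s.x + 1 ∧ s.x + 1 ≤ 5 then
      if ¬ s.r.contains (s.y, s.x) ∧ ¬ s.l.contains (s.y, s.x + 1) then
        { s with r := s.r.insert (s.y, s.x) 1, l := s.l.insert (s.y, s.x + 1) 1,
                 total := s.total + 1, y := s.y + 0, x := s.x + 1 }
      else { s with y := s.y + 0, x := s.x + 1 }
    else s) := rfl

theorem stepA_L (s : StA) : stepA s 'L' =
    (if -5 ≤ s.y + 0 ∧ s.y + 0 ≤ 5 ∧ -5 ≤ s.x + -1 ∧ s.x + -1 ≤ 5 then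
      if ¬ s.l.contains (s.y, s.x) ∧ ¬ s.r.contains (s.y, s.x - 1) then
        { s with l := s.l.insert (s.y, s.x) 1, r := s.r.insert (s.y, s.x - 1) 1,
                 total := s.total + 1, y := s.y + 0, x := s.x + -1 }
      else { s with y := s.y + 0, x := s.x + -1 }
    else s) := rfl

theorem stepB_red (s : StB) (c : Char) (dy dx : Int)
    (hget : posDictB.get? c = some (dy, dx)) : stepB s c =
    (if -5 ≤ s.y + dy ∧ s.y + dy ≤ 5 ∧ -5 ≤ s.x + dx ∧ s.x + dx ≤ 5 then
      { edges := s.edges ++ [if pairLe (s.y, s.x) (s.y + dy, s.x + dx)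
            then ((s.y, s.x), (s.y + dy, s.x + dx))
            else ((s.y + dy, s.x + dx), (s.y, s.x))],
        y := s.y + dy, x := s.x + dx }
    else s) := by
  unfold stepB
  rw [hget]

-- a dict whose key set tracks the f-edges present in S, after inserting the key of a new edge
theorem edgeInv_insert {α β : Type} [BEq α] [LawfulBEq α]
    (K : PySem.Dict α Int) (S : List β) (f : α → β)
    (hinj : ∀ a b, f a = f b → a = b) (k0 : α) (e : β) (he : f k0 = e)
    (inv : ∀ p, p ∈ K.keys ↔ f p ∈ S) :
    ∀ p, p ∈ (K.insert k0 1).keys ↔ f p ∈ S ++ [e] := by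
  intro p
  rw [PySem.Dict.mem_keys_insert, inv, List.mem_append, List.mem_singleton, ← he]
  constructor
  · rintro (rfl | h)
    · exact Or.inr rfl
    · exact Or.inl h
  · rintro (h | h)
    · exact Or.inr h
    · exact Or.inl (hinj _ _ h)

-- an untouched dict still tracks its f-edges after an edge of a different shape is appended
theorem edgeInv_skip {α β : Type} (K : List α) (S : List β) (f : α → β) (e : β)
    (hne : ∀ p, f p ≠ e) (inv : ∀ p, p ∈ K ↔ f p ∈ S) :
    ∀ p, p ∈ K ↔ f p ∈ S ++ [e] := by
  intro p
  rw [inv, List.mem_append, List.mem_singleton]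
  exact ⟨Or.inl, fun h => h.elim id (fun h => absurd h (hne p))⟩

-- appending an edge already present changes no dict's tracking condition
theorem edgeInv_dup {α β : Type} (K : List α) (S : List β) (f : α → β) (e : β)
    (he : e ∈ S) (inv : ∀ p, p ∈ K ↔ f p ∈ S) :
    ∀ p, p ∈ K ↔ f p ∈ S ++ [e] := by
  intro p
  rw [inv, List.mem_append, List.mem_singleton]
  exact ⟨Or.inl, fun h => h.elim id (fun h => h ▸ he)⟩

theorem len_append_singleton {β : Type} [BEq β] (S : PySem.Set β) (e : β) :
    PySem.Set.len (S ++ [e]) = PySem.Set.len S + 1 := by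
  simp [PySem.Set.len]

theorem ofList_append_singleton {β : Type} [BEq β] (L : List β) (e : β) :
    PySem.Set.ofList (L ++ [e]) = PySem.Set.add (PySem.Set.ofList L) e := by
  rw [PySem.Set.ofList_eq_foldl, PySem.Set.ofList_eq_foldl, List.foldl_append]
  rfl

theorem inv_step (sa : StA) (sb : StB) (c : Char)
    (hc : c = 'U' ∨ c = 'D' ∨ c = 'R' ∨ c = 'L')
    (h : EdgeInv sa sb) : EdgeInv (stepA sa c) (stepB sb c) := by
  obtain ⟨hy, hx, hpos, hbnd, ht, hu, hd, hr, hl⟩ := h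
  rcases hc with rfl | rfl | rfl | rfl
  · -- 'U' : edge ((y,x),(y+1,x))
    rw [stepA_U, stepB_red sb 'U' 1 0 rfl, ← hy, ← hx,
        if_pos (show pairLe (sa.y, sa.x) (sa.y + 1, sa.x + 0) = true by
          simp [pairLe]; try omega)]
    simp only [add_zero]
    by_cases hb : -5 ≤ sa.y + 1 ∧ sa.y + 1 ≤ 5 ∧ -5 ≤ sa.x ∧ sa.x ≤ 5
    · rw [if_pos hb, if_pos hb]
      have hin : EdgeInB ((sa.y, sa.x), (sa.y + 1, sa.x)) := by
        unfold EdgeInB; dsimp only; omega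
      have hbnd' : ∀ e ∈ sb.edges ++ [((sa.y, sa.x), (sa.y + 1, sa.x))], EdgeInB e := by
        intro e he
        rcases List.mem_append.mp he with h' | h'
        · exact hbnd e h'
        · rwa [List.mem_singleton.mp h']
      by_cases hm : ((sa.y, sa.x), (sa.y + 1, sa.x)) ∈ sb.edges
      · have hca : sa.u.contains (sa.y, sa.x) = true :=
          (PySem.Dict.contains_iff_mem_keys _ _).mpr ((hu (sa.y, sa.x)).mpr hm)
        rw [if_neg (by simp [hca])]
        refine ⟨rfl, rfl, by dsimp only; omega, hbnd', ?_,
          edgeInv_dup _ _ _ _ hm hu, edgeInv_dup _ _ _ _ hm hd,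
          edgeInv_dup _ _ _ _ hm hr, edgeInv_dup _ _ _ _ hm hl⟩
        rw [ht, ofList_append_singleton,
            PySem.Set.add_of_mem ((PySem.Set.mem_ofList _ _).mpr hm)]
      · have h1 : ¬ sa.u.contains (sa.y, sa.x) = true := fun hcu =>
          hm ((hu _).mp ((PySem.Dict.contains_iff_mem_keys _ _).mp hcu))
        have h2 : ¬ sa.d.contains (sa.y + 1, sa.x) = true := by
          intro hcd
          exact hm (by
            simpa using (hd (sa.y + 1, sa.x)).mp ((PySem.Dict.contains_iff_mem_keys _ _).mp hcd))
        rw [if_pos ⟨h1, h2⟩]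
        refine ⟨rfl, rfl, by dsimp only; omega, hbnd', ?_, ?_, ?_, ?_, ?_⟩
        · rw [ofList_append_singleton,
              PySem.Set.add_of_not_mem (fun hmem => hm ((PySem.Set.mem_ofList _ _).mp hmem)),
              len_append_singleton, ← ht]
        · exact edgeInv_insert sa.u sb.edges _ (fun a b h => congrArg Prod.fst h)
            (sa.y, sa.x) _ rfl hu
        · exact edgeInv_insert sa.d sb.edges _ (fun a b h => congrArg Prod.snd h)
            (sa.y + 1, sa.x) _ (by simp) hd
        · exact edgeInv_skip sa.r.keys sb.edges _ _
            (by rintro ⟨p1, p2⟩; simp [Prod.ext_iff]; try omega) hr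
        · exact edgeInv_skip sa.l.keys sb.edges _ _
            (by rintro ⟨p1, p2⟩; simp [Prod.ext_iff]; try omega) hl
    · rw [if_neg hb, if_neg hb]
      exact ⟨hy, hx, hpos, hbnd, ht, hu, hd, hr, hl⟩
  · -- 'D' : edge ((y-1,x),(y,x))
    rw [stepA_D, stepB_red sb 'D' (-1) 0 rfl, ← hy, ← hx,
        if_neg (show ¬ pairLe (sa.y, sa.x) (sa.y + -1, sa.x + 0) = true by
          simp [pairLe]; try omega)]
    simp only [add_zero, ← sub_eq_add_neg]
    by_cases hb : -5 ≤ sa.y - 1 ∧ sa.y - 1 ≤ 5 ∧ -5 ≤ sa.x ∧ sa.x ≤ 5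
    · rw [if_pos hb, if_pos hb]
      have hin : EdgeInB ((sa.y - 1, sa.x), (sa.y, sa.x)) := by
        unfold EdgeInB; dsimp only; omega
      have hbnd' : ∀ e ∈ sb.edges ++ [((sa.y - 1, sa.x), (sa.y, sa.x))], EdgeInB e := by
        intro e he
        rcases List.mem_append.mp he with h' | h'
        · exact hbnd e h'
        · rwa [List.mem_singleton.mp h']
      by_cases hm : ((sa.y - 1, sa.x), (sa.y, sa.x)) ∈ sb.edges
      · have hca : sa.d.contains (sa.y, sa.x) = true :=
          (PySem.Dict.contains_iff_mem_keys _ _).mpr ((hd (sa.y, sa.x)).mpr hm)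
        rw [if_neg (by simp [hca])]
        refine ⟨rfl, rfl, by dsimp only; omega, hbnd', ?_,
          edgeInv_dup _ _ _ _ hm hu, edgeInv_dup _ _ _ _ hm hd,
          edgeInv_dup _ _ _ _ hm hr, edgeInv_dup _ _ _ _ hm hl⟩
        rw [ht, ofList_append_singleton,
            PySem.Set.add_of_mem ((PySem.Set.mem_ofList _ _).mpr hm)]
      · have h1 : ¬ sa.d.contains (sa.y, sa.x) = true := fun hcd =>
          hm ((hd _).mp ((PySem.Dict.contains_iff_mem_keys _ _).mp hcd))
        have h2 : ¬ sa.u.contains (sa.y - 1, sa.x) = true := by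
          intro hcu
          exact hm (by
            simpa using (hu (sa.y - 1, sa.x)).mp ((PySem.Dict.contains_iff_mem_keys _ _).mp hcu))
        rw [if_pos ⟨h1, h2⟩]
        refine ⟨rfl, rfl, by dsimp only; omega, hbnd', ?_, ?_, ?_, ?_, ?_⟩
        · rw [ofList_append_singleton,
              PySem.Set.add_of_not_mem (fun hmem => hm ((PySem.Set.mem_ofList _ _).mp hmem)),
              len_append_singleton, ← ht]
        · exact edgeInv_insert sa.u sb.edges _ (fun a b h => congrArg Prod.fst h)
            (sa.y - 1, sa.x) _ (by simp) hu
        · exact edgeInv_insert sa.d sb.edges _ (fun a b h => congrArg Prod.snd h)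
            (sa.y, sa.x) _ rfl hd
        · exact edgeInv_skip sa.r.keys sb.edges _ _
            (by rintro ⟨p1, p2⟩; simp [Prod.ext_iff]; try omega) hr
        · exact edgeInv_skip sa.l.keys sb.edges _ _
            (by rintro ⟨p1, p2⟩; simp [Prod.ext_iff]; try omega) hl
    · rw [if_neg hb, if_neg hb]
      exact ⟨hy, hx, hpos, hbnd, ht, hu, hd, hr, hl⟩
  · -- 'R' : edge ((y,x),(y,x+1))
    rw [stepA_R, stepB_red sb 'R' 0 1 rfl, ← hy, ← hx,
        if_pos (show pairLe (sa.y, sa.x) (sa.y + 0, sa.x + 1) = true by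
          simp [pairLe]; try omega)]
    simp only [add_zero]
    by_cases hb : -5 ≤ sa.y ∧ sa.y ≤ 5 ∧ -5 ≤ sa.x + 1 ∧ sa.x + 1 ≤ 5
    · rw [if_pos hb, if_pos hb]
      have hin : EdgeInB ((sa.y, sa.x), (sa.y, sa.x + 1)) := by
        unfold EdgeInB; dsimp only; omega
      have hbnd' : ∀ e ∈ sb.edges ++ [((sa.y, sa.x), (sa.y, sa.x + 1))], EdgeInB e := by
        intro e he
        rcases List.mem_append.mp he with h' | h'
        · exact hbnd e h'
        · rwa [List.mem_singleton.mp h']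
      by_cases hm : ((sa.y, sa.x), (sa.y, sa.x + 1)) ∈ sb.edges
      · have hca : sa.r.contains (sa.y, sa.x) = true :=
          (PySem.Dict.contains_iff_mem_keys _ _).mpr ((hr (sa.y, sa.x)).mpr hm)
        rw [if_neg (by simp [hca])]
        refine ⟨rfl, rfl, by dsimp only; omega, hbnd', ?_,
          edgeInv_dup _ _ _ _ hm hu, edgeInv_dup _ _ _ _ hm hd,
          edgeInv_dup _ _ _ _ hm hr, edgeInv_dup _ _ _ _ hm hl⟩
        rw [ht, ofList_append_singleton,
            PySem.Set.add_of_mem ((PySem.Set.mem_ofList _ _).mpr hm)]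
      · have h1 : ¬ sa.r.contains (sa.y, sa.x) = true := fun hcr =>
          hm ((hr _).mp ((PySem.Dict.contains_iff_mem_keys _ _).mp hcr))
        have h2 : ¬ sa.l.contains (sa.y, sa.x + 1) = true := by
          intro hcl
          exact hm (by
            simpa using (hl (sa.y, sa.x + 1)).mp ((PySem.Dict.contains_iff_mem_keys _ _).mp hcl))
        rw [if_pos ⟨h1, h2⟩]
        refine ⟨rfl, rfl, by dsimp only; omega, hbnd', ?_, ?_, ?_, ?_, ?_⟩
        · rw [ofList_append_singleton,
              PySem.Set.add_of_not_mem (fun hmem => hm ((PySem.Set.mem_ofList _ _).mp hmem)),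
              len_append_singleton, ← ht]
        · exact edgeInv_skip sa.u.keys sb.edges _ _
            (by rintro ⟨p1, p2⟩; simp [Prod.ext_iff]; try omega) hu
        · exact edgeInv_skip sa.d.keys sb.edges _ _
            (by rintro ⟨p1, p2⟩; simp [Prod.ext_iff]; try omega) hd
        · exact edgeInv_insert sa.r sb.edges _ (fun a b h => congrArg Prod.fst h)
            (sa.y, sa.x) _ rfl hr
        · exact edgeInv_insert sa.l sb.edges _ (fun a b h => congrArg Prod.snd h)
            (sa.y, sa.x + 1) _ (by simp) hl
    · rw [if_neg hb, if_neg hb]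
      exact ⟨hy, hx, hpos, hbnd, ht, hu, hd, hr, hl⟩
  · -- 'L' : edge ((y,x-1),(y,x))
    rw [stepA_L, stepB_red sb 'L' 0 (-1) rfl, ← hy, ← hx,
        if_neg (show ¬ pairLe (sa.y, sa.x) (sa.y + 0, sa.x + -1) = true by
          simp [pairLe]; try omega)]
    simp only [add_zero, ← sub_eq_add_neg]
    by_cases hb : -5 ≤ sa.y ∧ sa.y ≤ 5 ∧ -5 ≤ sa.x - 1 ∧ sa.x - 1 ≤ 5
    · rw [if_pos hb, if_pos hb]
      have hin : EdgeInB ((sa.y, sa.x - 1), (sa.y, sa.x)) := by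
        unfold EdgeInB; dsimp only; omega
      have hbnd' : ∀ e ∈ sb.edges ++ [((sa.y, sa.x - 1), (sa.y, sa.x))], EdgeInB e := by
        intro e he
        rcases List.mem_append.mp he with h' | h'
        · exact hbnd e h'
        · rwa [List.mem_singleton.mp h']
      by_cases hm : ((sa.y, sa.x - 1), (sa.y, sa.x)) ∈ sb.edges
      · have hca : sa.l.contains (sa.y, sa.x) = true :=
          (PySem.Dict.contains_iff_mem_keys _ _).mpr ((hl (sa.y, sa.x)).mpr hm)
        rw [if_neg (by simp [hca])]
        refine ⟨rfl, rfl, by dsimp only; omega, hbnd', ?_,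
          edgeInv_dup _ _ _ _ hm hu, edgeInv_dup _ _ _ _ hm hd,
          edgeInv_dup _ _ _ _ hm hr, edgeInv_dup _ _ _ _ hm hl⟩
        rw [ht, ofList_append_singleton,
            PySem.Set.add_of_mem ((PySem.Set.mem_ofList _ _).mpr hm)]
      · have h1 : ¬ sa.l.contains (sa.y, sa.x) = true := fun hcl =>
          hm ((hl _).mp ((PySem.Dict.contains_iff_mem_keys _ _).mp hcl))
        have h2 : ¬ sa.r.contains (sa.y, sa.x - 1) = true := by
          intro hcr
          exact hm (by
            simpa using (hr (sa.y, sa.x - 1)).mp ((PySem.Dict.contains_iff_mem_keys _ _).mp hcr))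
        rw [if_pos ⟨h1, h2⟩]
        refine ⟨rfl, rfl, by dsimp only; omega, hbnd', ?_, ?_, ?_, ?_, ?_⟩
        · rw [ofList_append_singleton,
              PySem.Set.add_of_not_mem (fun hmem => hm ((PySem.Set.mem_ofList _ _).mp hmem)),
              len_append_singleton, ← ht]
        · exact edgeInv_skip sa.u.keys sb.edges _ _
            (by rintro ⟨p1, p2⟩; simp [Prod.ext_iff]; try omega) hu
        · exact edgeInv_skip sa.d.keys sb.edges _ _
            (by rintro ⟨p1, p2⟩; simp [Prod.ext_iff]; try omega) hd
        · exact edgeInv_insert sa.r sb.edges _ (fun a b h => congrArg Prod.fst h)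
            (sa.y, sa.x - 1) _ (by simp) hr
        · exact edgeInv_insert sa.l sb.edges _ (fun a b h => congrArg Prod.snd h)
            (sa.y, sa.x) _ rfl hl
    · rw [if_neg hb, if_neg hb]
      exact ⟨hy, hx, hpos, hbnd, ht, hu, hd, hr, hl⟩

theorem inv_fold (cs : List Char) (sa : StA) (sb : StB)
    (hc : ∀ c ∈ cs, c = 'U' ∨ c = 'D' ∨ c = 'R' ∨ c = 'L')
    (h : EdgeInv sa sb) : EdgeInv (cs.foldl stepA sa) (cs.foldl stepB sb) := by
  induction cs generalizing sa sb with
  | nil => exact h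
  | cons c cs ih =>
    exact ih _ _ (fun d hd => hc d (List.mem_cons_of_mem _ hd))
      (inv_step sa sb c (hc c (List.mem_cons_self)) h)

-- ===== the counting phase: run count of a key-sorted list = number of distinct elements =====

-- edgeKey is injective on in-bounds edges
theorem edgeKey_inj {a b : (Int × Int) × (Int × Int)}
    (ha : EdgeInB a) (hb : EdgeInB b) (h : edgeKey a = edgeKey b) : a = b := by
  obtain ⟨⟨a1, a2⟩, a3, a4⟩ := a
  obtain ⟨⟨b1, b2⟩, b3, b4⟩ := b
  unfold EdgeInB at ha hb
  unfold edgeKey at h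
  simp only [Prod.mk.injEq] at *
  omega

theorem foldl_add_cons {α : Type} [BEq α] [LawfulBEq α] (p : α) :
    ∀ (l : List α) (s : PySem.Set α), p ∉ l →
      List.foldl PySem.Set.add (p :: s) l = p :: List.foldl PySem.Set.add s l
  | [], _, _ => rfl
  | x :: t, s, h => by
    simp only [List.foldl_cons]
    have hx : x ≠ p := fun he => h (he ▸ List.mem_cons_self)
    have hstep : PySem.Set.add (p :: s) x = p :: PySem.Set.add s x := by
      rw [PySem.Set.add_eq_ite, PySem.Set.add_eq_ite]
      by_cases hm : x ∈ s
      · rw [if_pos (List.mem_cons_of_mem _ hm), if_pos hm]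
      · rw [if_neg (by simp [hx, hm]), if_neg hm]; rfl
    rw [hstep, foldl_add_cons p t (PySem.Set.add s x)
      (fun hmem => h (List.mem_cons_of_mem _ hmem))]

theorem ofList_cons_not_mem {α : Type} [BEq α] [LawfulBEq α] {p : α} {l : List α}
    (h : p ∉ l) : PySem.Set.ofList (p :: l) = p :: PySem.Set.ofList l := by
  rw [PySem.Set.ofList_eq_foldl, PySem.Set.ofList_eq_foldl, List.foldl_cons]
  rw [show PySem.Set.add [] p = p :: [] from by
    rw [PySem.Set.add_eq_ite, if_neg (List.not_mem_nil)]; rfl]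
  exact foldl_add_cons p l [] h

theorem ofList_cons_self {α : Type} [BEq α] [LawfulBEq α] (a : α) (t : List α) :
    PySem.Set.ofList (a :: a :: t) = PySem.Set.ofList (a :: t) := by
  rw [PySem.Set.ofList_eq_foldl, PySem.Set.ofList_eq_foldl]
  simp only [List.foldl_cons]
  have h1 : PySem.Set.add ([] : PySem.Set α) a = [a] := by
    rw [PySem.Set.add_eq_ite, if_neg (List.not_mem_nil)]; rfl
  rw [h1, PySem.Set.add_of_mem (List.mem_singleton.mpr rfl)]

-- the run-counting scan over a key-sorted list, with injective key on its members
theorem foldl_count_runs (l : List ((Int × Int) × (Int × Int)))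
    (p : (Int × Int) × (Int × Int)) (c : Int)
    (hp : (p :: l).Pairwise (fun a b => edgeKey a ≤ edgeKey b))
    (hinj : ∀ a ∈ p :: l, ∀ b ∈ p :: l, edgeKey a = edgeKey b → a = b) :
    (l.foldl (fun s e => if some e = s.2 then s else (s.1 + 1, some e)) (c, some p)).1
      = c + PySem.Set.len (PySem.Set.ofList (p :: l)) - 1 := by
  induction l generalizing p c with
  | nil =>
    rw [ofList_cons_not_mem List.not_mem_nil]
    simp [PySem.Set.len, PySem.Set.ofList_eq_foldl]
  | cons e t ih =>
    simp only [List.foldl_cons]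
    by_cases hep : e = p
    · subst hep
      rw [if_pos rfl]
      rw [ih e c (hp.sublist (by simp))
            (fun a ha b hb => hinj a (List.mem_cons_of_mem _ ha) b (List.mem_cons_of_mem _ hb)),
          ofList_cons_self]
    · rw [if_neg (by simp [hep])]
      have hpl : (e :: t).Pairwise (fun a b => edgeKey a ≤ edgeKey b) :=
        hp.sublist (List.sublist_cons_self _ _)
      have hnm : p ∉ e :: t := by
        intro hmem
        rcases List.mem_cons.mp hmem with h' | h'
        · exact hep h'.symm
        · -- p ∈ t: keys force edgeKey p = edgeKey e, injectivity forces p = e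
          have h1 : edgeKey p ≤ edgeKey e := (List.pairwise_cons.mp hp).1 e List.mem_cons_self
          have h2 : edgeKey e ≤ edgeKey p := (List.pairwise_cons.mp hpl).1 p h'
          exact hep (hinj e (by simp) p (by simp) (le_antisymm h2 h1))
      rw [ih e (c + 1) hpl (fun a ha b hb =>
            hinj a (List.mem_cons_of_mem _ ha) b (List.mem_cons_of_mem _ hb)),
          ofList_cons_not_mem hnm]
      simp only [PySem.Set.len, List.length_cons]
      push_cast
      ring

-- number of distinct elements is invariant under permutation
theorem len_ofList_perm {α : Type} [BEq α] [LawfulBEq α] [DecidableEq α]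
    {L₁ L₂ : List α} (h : L₁.Perm L₂) :
    PySem.Set.len (PySem.Set.ofList L₁) = PySem.Set.len (PySem.Set.ofList L₂) := by
  have hc : ∀ L : List α, (PySem.Set.ofList L).length = L.toFinset.card := by
    intro L
    rw [← List.toFinset_card_of_nodup (PySem.Set.nodup_ofList L)]
    congr 1
    ext x
    simp [PySem.Set.mem_ofList]
  have h2 : L₁.toFinset = L₂.toFinset := by ext x; simp [h.mem_iff]
  simp only [PySem.Set.len, hc, h2]

-- ===== VERDICT (by name: the statement is the Claim_ definition above) =====
theorem solution_spec : Claim_equal_solution := by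
  intro dirs _ hpre
  unfold Spec_solution solution solution_alt
  have hpre' : ∀ c ∈ dirs.toList, c = 'U' ∨ c = 'D' ∨ c = 'R' ∨ c = 'L' := by
    intro c hcmem
    have := List.all_eq_true.mp hpre c hcmem
    simp at this; tauto
  have h := inv_fold dirs.toList
    ⟨0, PySem.Dict.empty, PySem.Dict.empty, PySem.Dict.empty, PySem.Dict.empty, 0, 0⟩
    ⟨[], 0, 0⟩ hpre'
    (by
      refine ⟨rfl, rfl, by norm_num, by simp, rfl, ?_, ?_, ?_, ?_⟩ <;>
        (intro p; simp [PySem.Dict.empty, PySem.Dict.keys]))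
  obtain ⟨_, _, _, hbnd, ht, _⟩ := h
  set edges := (dirs.toList.foldl stepB ⟨[], 0, 0⟩).edges with hedges
  have hperm := PySem.List.sorted_perm edges edgeKey false
  have hp := PySem.List.sorted_pairwise edges edgeKey
  have hinj : ∀ a ∈ PySem.List.sorted edges edgeKey false,
      ∀ b ∈ PySem.List.sorted edges edgeKey false, edgeKey a = edgeKey b → a = b := by
    intro a ha b hb
    exact edgeKey_inj (hbnd a ((PySem.List.mem_sorted _ _ _ _).mp ha))
      (hbnd b ((PySem.List.mem_sorted _ _ _ _).mp hb))
  rw [ht]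
  show (PySem.Set.ofList edges).len =
    (List.foldl (fun s e => if some e = s.2 then s else (s.1 + 1, some e))
      ((0 : Int), (none : Option ((Int × Int) × (Int × Int))))
      (PySem.List.sorted edges edgeKey false)).1
  cases hs : PySem.List.sorted edges edgeKey false with
  | nil =>
    have he : edges = [] := by
      have h' := hperm
      rw [hs] at h'
      exact h'.symm.eq_nil
    rw [he]
    simp [PySem.Set.len, PySem.Set.ofList_eq_foldl]
  | cons e t =>
    rw [hs] at hp hinj hperm
    rw [List.foldl_cons, if_neg (by simp)]
    norm_num
    rw [foldl_count_runs t e 1 hp hinj]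
    have hlp := len_ofList_perm hperm
    simp only [PySem.Set.len] at hlp ⊢
    omega
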